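-- pv_equiv track=rewrite | github.com/amro-coder/A2SV | 1202-smallest-string-with-swaps/1202-smallest-string-with-swaps.py | dfs
-- ===== SOURCE A (Python) =====
-- def dfs(node,visited,graph):
--     ans=[]
--     stack=[node]
--     while stack:
--         parent=stack.pop()
--         if not visited[parent]:
--             visited[parent]=True
--             ans.append(parent)
--             for child in graph[parent]:
--                 if not visited[child]:
--                     stack.append(child)
--     return sorted(ans)
-- ===== SOURCE B (Python) =====
-- def dfs(node, visited, graph):
--     # Frontier-by-frontier traversal with mark-on-discovery (no explicit DFS stack,
--     # no duplicate worklist entries); mutates `visited` exactly like A (all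
--     # component nodes set True); output sorted, so traversal order is irrelevant.
--     if visited[node]:
--         return []
--     visited[node] = True
--     comp = [node]
--     frontier = [node]
--     while frontier:
--         nxt = []
--         for u in frontier:
--             for c in graph[u]:
--                 if not visited[c]:
--                     visited[c] = True
--                     comp.append(c)
--                     nxt.append(c)
--         frontier = nxt
--     return sorted(comp)
-- ===== Notes on version B (the rewrite author's own statement) =====
-- stated objective: alternative
-- what changed: Replaced the explicit DFS stack with late visited-checks (nodes can sit duplicated on the stack and are filtered at pop) by a frontier-at-a-time expansion that marks nodes on first discovery, so the worklist never holds duplicates or already-visited nodes; the component is sorted once at the end as before.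
-- outside the precondition, e.g. on dfs(0, [False, False], [[1, -1], []]): A returns [-1, 0], B returns [0, 1]; on dfs(0, [False, False], [[], [5]]): A returns [0], B returns [0]
import Mathlib
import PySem

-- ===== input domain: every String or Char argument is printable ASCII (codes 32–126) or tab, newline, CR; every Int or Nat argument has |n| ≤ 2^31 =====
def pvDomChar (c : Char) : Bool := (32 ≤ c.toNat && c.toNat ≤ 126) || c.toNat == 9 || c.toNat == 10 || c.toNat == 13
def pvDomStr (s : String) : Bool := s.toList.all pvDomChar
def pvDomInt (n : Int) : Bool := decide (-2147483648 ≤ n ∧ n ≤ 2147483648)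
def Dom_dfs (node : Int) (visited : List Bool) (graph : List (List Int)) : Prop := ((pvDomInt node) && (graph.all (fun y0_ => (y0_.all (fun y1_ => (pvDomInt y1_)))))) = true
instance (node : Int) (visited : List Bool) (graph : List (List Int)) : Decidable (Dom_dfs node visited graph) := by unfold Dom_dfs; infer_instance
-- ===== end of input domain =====

-- B replaces A's explicit DFS stack (late visited-check, duplicates possible on the stack)
-- by frontier-at-a-time expansion with mark-on-discovery; both sort the component once at the end.
-- Both Pythons mutate `visited` identically (all component nodes set True); the theorems below are
-- about the return value.

-- ===== PORT A =====
-- marking a slot that currently holds `false` removes exactly one `false`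
-- (cited by the ports' decreasing_by, so it lives above them)
theorem pvCountSet (l : List Bool) (k : Nat) (h : k < l.length) (hf : l[k] = false) :
    (l.set k true).count false + 1 = l.count false := by
  have h1 : l.set k true = l.take k ++ true :: l.drop (k+1) :=
    (List.set_eq_take_append_cons_drop ..).trans (by simp [h])
  have h2 : l = l.take k ++ false :: l.drop (k+1) := by
    conv_lhs => rw [← List.take_append_drop k l, List.drop_eq_getElem_cons h, hf]
  rw [h1]; conv_rhs => rw [h2]
  simp [List.count_append]; omega

theorem pvMarkCount (vis : List Bool) (p : Int)
    (h : PySem.List.pyGet? vis p = some false) :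
    (PySem.List.pySetD vis p true).count false + 1 = vis.count false := by
  simp only [PySem.List.pyGet?, PySem.List.pySetD, PySem.List.pySet?] at *
  rcases hk : PySem.List.pyIdx? vis.length p with _ | k <;> rw [hk] at h <;>
    simp only [Option.bind] at h
  · simp at h
  · simp only [Option.map_some, Option.getD_some]
    have hlt : k < vis.length := by
      by_contra hge
      rw [List.getElem?_eq_none (by omega)] at h; simp at h
    have hf : vis[k] = false := by
      rw [List.getElem?_eq_getElem hlt] at h; exact Option.some.inj h
    exact pvCountSet vis k hlt hf

-- A's loop; stack head = top (Python's list.pop() pops the END, pushing `for child in row`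
-- then popping therefore conses row.reverse).  Where Python raises IndexError
-- (pyGet? = none) the port returns the accumulator (those inputs are outside Pre_dfs).
def dfsLoopA (graph : List (List Int)) (vis : List Bool) (stack ans : List Int) : List Int :=
  match stack with
  | [] => ans
  | p :: rest =>
    match hv : PySem.List.pyGet? vis p with
    | none => ans
    | some true => dfsLoopA graph vis rest ans
    | some false =>
      let vis' := PySem.List.pySetD vis p true
      match PySem.List.pyGet? graph p with
      | none => ans ++ [p]
      | some row =>
        dfsLoopA graph vis'
          ((row.filter (fun c => PySem.List.pyGetD vis' c true = false)).reverse ++ rest)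
          (ans ++ [p])
termination_by (vis.count false, stack.length)
decreasing_by
  · exact Prod.Lex.right _ (Nat.lt_succ_self _)
  · exact Prod.Lex.left _ _ (by have := pvMarkCount vis p hv; omega)

def dfs (node : Int) (visited : List Bool) (graph : List (List Int)) : List Int :=
  PySem.List.sorted (dfsLoopA graph visited [node] []) (fun x => x) false

-- ===== PORT B =====
theorem pvGetDFalseIff (xs : List Bool) (c : Int) :
    (PySem.List.pyGetD xs c true = false) ↔ PySem.List.pyGet? xs c = some false := by
  simp only [PySem.List.pyGetD]
  cases PySem.List.pyGet? xs c <;> simp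

-- one `if not visited[c]: mark; comp.append(c); nxt.append(c)` step; state = (visited, comp, nxt)
def markStep (st : List Bool × List Int × List Int) (c : Int) : List Bool × List Int × List Int :=
  if PySem.List.pyGetD st.1 c true = false then
    (PySem.List.pySetD st.1 c true, st.2.1 ++ [c], st.2.2 ++ [c])
  else st

-- one level of B's while-loop: `for u in frontier: for c in graph[u]: …`
def levelStep (graph : List (List Int)) (st : List Bool × List Int × List Int)
    (front : List Int) : List Bool × List Int × List Int :=
  front.foldl (fun st u => (PySem.List.pyGetD graph u []).foldl markStep st) st

theorem pvMarkStepCount (st : List Bool × List Int × List Int) (c : Int) :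
    (markStep st c).1.count false + (markStep st c).2.2.length
      = st.1.count false + st.2.2.length := by
  unfold markStep
  split
  · next h =>
    have := pvMarkCount st.1 c ((pvGetDFalseIff st.1 c).mp h)
    simp; omega
  · rfl

theorem pvRowFoldCount (cs : List Int) (st : List Bool × List Int × List Int) :
    (cs.foldl markStep st).1.count false + (cs.foldl markStep st).2.2.length
      = st.1.count false + st.2.2.length := by
  induction cs generalizing st with
  | nil => rfl
  | cons c cs ih => simpa [List.foldl_cons, ih (markStep st c)] using pvMarkStepCount st c

theorem pvLevelCount (graph : List (List Int)) (front : List Int)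
    (st : List Bool × List Int × List Int) :
    (levelStep graph st front).1.count false + (levelStep graph st front).2.2.length
      = st.1.count false + st.2.2.length := by
  induction front generalizing st with
  | nil => rfl
  | cons u front ih =>
    simp only [levelStep, List.foldl_cons] at *
    rw [ih]; exact pvRowFoldCount _ st

-- B's while-loop over frontiers
def dfsLoopB (graph : List (List Int)) (vis : List Bool) (front comp : List Int) : List Int :=
  match front with
  | [] => comp
  | _ :: _ =>
    let st := levelStep graph (vis, comp, []) front
    dfsLoopB graph st.1 st.2.2 st.2.1
termination_by (vis.count false, front.length)
decreasing_by
  have h := pvLevelCount graph front (vis, comp, [])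
  simp only [List.length_nil, Nat.add_zero] at h
  rcases Nat.eq_zero_or_pos (levelStep graph (vis, comp, []) front).2.2.length with h0 | h0
  · have hc : (levelStep graph (vis, comp, []) front).1.count false = vis.count false := by omega
    rw [hc, h0]
    exact Prod.Lex.right _ (by simp)
  · exact Prod.Lex.left _ _ (by omega)

def dfs_alt (node : Int) (visited : List Bool) (graph : List (List Int)) : List Int :=
  match PySem.List.pyGet? visited node with
  | none => []            -- Python raises IndexError here
  | some true => []
  | some false =>
    PySem.List.sorted
      (dfsLoopB graph (PySem.List.pySetD visited node true) [node] [node])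
      (fun x => x) false

-- ===== PRECONDITION & SPEC =====
-- Pre_ admits the inputs where the start node is already visited (A touches nothing else and
-- returns []) and otherwise requires every index nonnegative and in range of both lists:
-- Python's negative-index wraparound lets two labels alias one visited-slot, making A's result
-- an accident of traversal order, and an out-of-range entry met during the traversal raises
-- IndexError; validity of only the reachable entries cannot be stated without re-running the
-- traversal, so Pre_ asks it of all entries.
def Pre_dfs (node : Int) (visited : List Bool) (graph : List (List Int)) : Prop :=
  PySem.List.pyGet? visited node = some true ∨
    (0 ≤ node ∧ node < (visited.length : Int) ∧ node < (graph.length : Int) ∧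
      ∀ row ∈ graph, ∀ c ∈ row,
        0 ≤ c ∧ c < (visited.length : Int) ∧ c < (graph.length : Int))
instance (node : Int) (visited : List Bool) (graph : List (List Int)) :
    Decidable (Pre_dfs node visited graph) := by unfold Pre_dfs; infer_instance

def pvWitness_dfs : Int × List Bool × List (List Int) := (0, [false, false], [[1], [0]])

def Spec_dfs (node : Int) (visited : List Bool) (graph : List (List Int)) (out : List Int) : Prop := out = dfs_alt node visited graph
instance (node : Int) (visited : List Bool) (graph : List (List Int)) (out : List Int) : Decidable (Spec_dfs node visited graph out) := by unfold Spec_dfs; infer_instance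

-- ===== CLAIM (what is proved, stated in full; the proofs are below) =====
def Claim_equal_dfs : Prop := ∀ (node : Int) (visited : List Bool) (graph : List (List Int)), Dom_dfs node visited graph → Pre_dfs node visited graph → Spec_dfs node visited graph (dfs node visited graph)

-- ===== LEMMAS AND PROOFS =====

-- ---- small pyGet?/pySetD facts (all indices in these proofs are nonnegative) ----
theorem pvGetSome {T : Type} (xs : List T) (i : Int) (h0 : 0 ≤ i)
    (h1 : i < (xs.length : Int)) : ∃ a, PySem.List.pyGet? xs i = some a := by
  rw [PySem.List.pyGet?_of_nonneg xs h0]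
  have : i.toNat < xs.length := by omega
  exact ⟨xs[i.toNat], List.getElem?_eq_getElem this⟩

theorem pvGSself (vis : List Bool) (p : Int) (h0 : 0 ≤ p)
    (h : PySem.List.pyGet? vis p = some false) :
    PySem.List.pyGet? (PySem.List.pySetD vis p true) p = some true := by
  rw [PySem.List.pyGet?_of_nonneg vis h0] at h
  rw [PySem.List.pySetD_of_nonneg vis true h0,
      PySem.List.pyGet?_of_nonneg _ h0]
  have hlt : p.toNat < vis.length := by
    by_contra hge
    rw [List.getElem?_eq_none (by omega)] at h; simp at h
  exact List.getElem?_set_self hlt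

theorem pvGSne (vis : List Bool) (p y : Int) (h0 : 0 ≤ p) (hy : 0 ≤ y) (hne : y ≠ p) :
    PySem.List.pyGet? (PySem.List.pySetD vis p true) y = PySem.List.pyGet? vis y := by
  rw [PySem.List.pySetD_of_nonneg vis true h0,
      PySem.List.pyGet?_of_nonneg _ hy, PySem.List.pyGet?_of_nonneg vis hy]
  exact List.getElem?_set_ne (by omega)

-- ---- reachability through initially-unvisited nodes ----
-- ReachA g vis stack x: x is reachable from some unvisited stack element through
-- edges whose endpoints are unvisited (w.r.t. vis); exactly the set A's loop marks.
inductive ReachA (g : List (List Int)) (vis : List Bool) (stack : List Int) : Int → Prop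
  | base (x : Int) : x ∈ stack → 0 ≤ x → PySem.List.pyGet? vis x = some false →
      ReachA g vis stack x
  | step (p c : Int) (row : List Int) : ReachA g vis stack p →
      PySem.List.pyGet? g p = some row → c ∈ row → 0 ≤ c →
      PySem.List.pyGet? vis c = some false → ReachA g vis stack c

-- ReachB g vis front x: x is a strict descendant of a frontier element through
-- unvisited nodes; exactly the set B's remaining levels mark.
inductive ReachB (g : List (List Int)) (vis : List Bool) (front : List Int) : Int → Prop
  | base (p c : Int) (row : List Int) : p ∈ front →
      PySem.List.pyGet? g p = some row → c ∈ row → 0 ≤ c →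
      PySem.List.pyGet? vis c = some false → ReachB g vis front c
  | step (p c : Int) (row : List Int) : ReachB g vis front p →
      PySem.List.pyGet? g p = some row → c ∈ row → 0 ≤ c →
      PySem.List.pyGet? vis c = some false → ReachB g vis front c

theorem pvReachA_unvis {g : List (List Int)} {vis : List Bool} {stack : List Int} {x : Int}
    (h : ReachA g vis stack x) : 0 ≤ x ∧ PySem.List.pyGet? vis x = some false := by
  cases h <;> exact ⟨by assumption, by assumption⟩

theorem pvReachB_unvis {g : List (List Int)} {vis : List Bool} {front : List Int} {x : Int}
    (h : ReachB g vis front x) : 0 ≤ x ∧ PySem.List.pyGet? vis x = some false := by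
  cases h <;> exact ⟨by assumption, by assumption⟩

theorem pvReachA_nil {g : List (List Int)} {vis : List Bool} {x : Int}
    (h : ReachA g vis [] x) : False := by
  induction h with
  | base x hm _ _ => simp at hm
  | step _ _ _ _ _ _ _ _ ih => exact ih

theorem pvReachB_nil {g : List (List Int)} {vis : List Bool} {x : Int}
    (h : ReachB g vis [] x) : False := by
  induction h with
  | base p _ _ hm _ _ _ _ => simp at hm
  | step _ _ _ _ _ _ _ _ ih => exact ih

theorem pvReachA_congr {g : List (List Int)} {vis : List Bool} {s₁ s₂ : List Int} {x : Int}
    (hc : ∀ y, 0 ≤ y → PySem.List.pyGet? vis y = some false → (y ∈ s₁ → y ∈ s₂))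
    (h : ReachA g vis s₁ x) : ReachA g vis s₂ x := by
  induction h with
  | base x hm h0 hu => exact .base x (hc x h0 hu hm) h0 hu
  | step p c row _ hrow hcr h0 hu ih => exact .step p c row ih hrow hcr h0 hu

-- removing/adding a VISITED head does not change the reachable set
theorem pvReachA_skip {g : List (List Int)} {vis : List Bool} {p : Int} {rest : List Int}
    (hp : PySem.List.pyGet? vis p = some true) (x : Int) :
    ReachA g vis (p :: rest) x ↔ ReachA g vis rest x := by
  constructor
  · refine pvReachA_congr (fun y h0 hu hm => ?_)
    rcases List.mem_cons.mp hm with rfl | hm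
    · rw [hp] at hu; simp at hu
    · exact hm
  · exact pvReachA_congr (fun y _ _ hm => List.mem_cons_of_mem _ hm)

-- THE frontier lemma for A: popping an unvisited p, marking it and pushing its row
theorem pvReachA_frontier {g : List (List Int)} {vis : List Bool} {p : Int}
    {rest row : List Int} (h0 : 0 ≤ p) (hp : PySem.List.pyGet? vis p = some false)
    (hrow : PySem.List.pyGet? g p = some row) (x : Int) :
    ReachA g vis (p :: rest) x ↔
      (x = p ∨ ReachA g (PySem.List.pySetD vis p true) (row ++ rest) x) := by
  constructor
  · intro h
    induction h with
    | base x hm h0x hux =>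
      by_cases hxp : x = p
      · exact Or.inl hxp
      · refine Or.inr (.base x ?_ h0x ?_)
        · rcases List.mem_cons.mp hm with rfl | hm
          · exact absurd rfl hxp
          · exact List.mem_append_right _ hm
        · rw [pvGSne vis p x h0 h0x hxp]; exact hux
    | step p' c row' _ hrow' hcr h0c huc ih =>
      by_cases hcp : c = p
      · exact Or.inl hcp
      · refine Or.inr ?_
        have huc' : PySem.List.pyGet? (PySem.List.pySetD vis p true) c = some false := by
          rw [pvGSne vis p c h0 h0c hcp]; exact huc
        rcases ih with rfl | hr
        · have : row' = row := by rw [hrow'] at hrow; exact Option.some.inj hrow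
          subst this
          exact .base c (List.mem_append_left _ hcr) h0c huc'
        · exact .step p' c row' hr hrow' hcr h0c huc'
  · rintro (rfl | h)
    · exact .base x List.mem_cons_self h0 hp
    · induction h with
      | base x hm h0x hux =>
        have hxp : x ≠ p := by
          intro rfl
          rw [pvGSself vis x h0 hp] at hux; simp at hux
        have hux' : PySem.List.pyGet? vis x = some false := by
          rw [← pvGSne vis p x h0 h0x hxp]; exact hux
        rcases List.mem_append.mp hm with hr | hr
        · exact .step p x row (.base p List.mem_cons_self h0 hp) hrow hr h0x hux'
        · exact .base x (List.mem_cons_of_mem _ hr) h0x hux'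
      | step p' c row' _ hrow' hcr h0c huc ih =>
        have hcp : c ≠ p := by
          intro rfl
          rw [pvGSself vis c h0 hp] at huc; simp at huc
        have huc' : PySem.List.pyGet? vis c = some false := by
          rw [← pvGSne vis p c h0 h0c hcp]; exact huc
        exact .step p' c row' ih hrow' hcr h0c huc'

-- bridge: B's strict descendants of [u] = A's reachable set from u's row
theorem pvReachBA {g : List (List Int)} {vis : List Bool} {u : Int} {row : List Int}
    (hrow : PySem.List.pyGet? g u = some row) (x : Int) :
    ReachB g vis [u] x ↔ ReachA g vis row x := by
  constructor
  · intro h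
    induction h with
    | base p c row' hm hrow' hcr h0c huc =>
      have : p = u := by simpa using hm
      subst this
      have : row' = row := by rw [hrow'] at hrow; exact Option.some.inj hrow
      subst this
      exact .base c hcr h0c huc
    | step p c row' _ hrow' hcr h0c huc ih => exact .step p c row' ih hrow' hcr h0c huc
  · intro h
    induction h with
    | base x hm h0x hux => exact .base u x row (by simp) hrow hm h0x hux
    | step p c row' _ hrow' hcr h0c huc ih => exact .step p c row' ih hrow' hcr h0c huc

-- level lemma for B: one frontier expansion peels off exactly the newly marked delta
theorem pvReachB_level {g : List (List Int)} {vis vis' : List Bool}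
    {front delta : List Int}
    (hM : ∀ x, x ∈ delta ↔ (PySem.List.pyGet? vis x = some false ∧
        ∃ u ∈ front, ∃ row, PySem.List.pyGet? g u = some row ∧ x ∈ row))
    (hdn : ∀ x ∈ delta, 0 ≤ x)
    (hV : ∀ y : Int, 0 ≤ y → PySem.List.pyGet? vis' y =
        (if y ∈ delta then some true else PySem.List.pyGet? vis y)) (x : Int) :
    ReachB g vis front x ↔ (x ∈ delta ∨ ReachB g vis' delta x) := by
  have hbase : ∀ z, z ∈ delta → ReachB g vis front z := by
    intro z hz
    obtain ⟨hu, u, hm, row, hrow, hzr⟩ := (hM z).mp hz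
    exact .base u z row hm hrow hzr (hdn z hz) hu
  constructor
  · intro h
    induction h with
    | base p c row hm hrow hcr h0c huc =>
      exact Or.inl ((hM c).mpr ⟨huc, p, hm, row, hrow, hcr⟩)
    | step p c row _ hrow hcr h0c huc ih =>
      by_cases hcd : c ∈ delta
      · exact Or.inl hcd
      · have huc' : PySem.List.pyGet? vis' c = some false := by
          rw [hV c h0c, if_neg hcd]; exact huc
        rcases ih with hpd | hr
        · exact Or.inr (.base p c row hpd hrow hcr h0c huc')
        · exact Or.inr (.step p c row hr hrow hcr h0c huc')
  · rintro (hz | h)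
    · exact hbase x hz
    · induction h with
      | base p c row hm hrow hcr h0c huc =>
        have hcd : c ∉ delta := by
          intro hcd; rw [hV c h0c, if_pos hcd] at huc; simp at huc
        have huc' : PySem.List.pyGet? vis c = some false := by
          rw [hV c h0c, if_neg hcd] at huc; exact huc
        exact .step p c row (hbase p hm) hrow hcr h0c huc'
      | step p c row _ hrow hcr h0c huc ih =>
        have hcd : c ∉ delta := by
          intro hcd; rw [hV c h0c, if_pos hcd] at huc; simp at huc
        have huc' : PySem.List.pyGet? vis c = some false := by
          rw [hV c h0c, if_neg hcd] at huc; exact huc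
        exact .step p c row ih hrow hcr h0c huc'

-- ---- the inner (per-level) fold of B ----
theorem pvRowFoldSpec (cs : List Int) (hcs : ∀ c ∈ cs, 0 ≤ c)
    (visC : List Bool) (comp nxt : List Int) :
    ∃ visC' d, cs.foldl markStep (visC, comp, nxt) = (visC', comp ++ d, nxt ++ d) ∧
      d.Nodup ∧
      (∀ x, x ∈ d ↔ (PySem.List.pyGet? visC x = some false ∧ x ∈ cs)) ∧
      (∀ y : Int, 0 ≤ y → PySem.List.pyGet? visC' y =
        (if y ∈ d then some true else PySem.List.pyGet? visC y)) := by
  induction cs generalizing visC comp nxt with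
  | nil =>
    exact ⟨visC, [], by simp, List.nodup_nil, by simp, by simp⟩
  | cons c cs ih =>
    have h0c : 0 ≤ c := hcs c List.mem_cons_self
    have hcs' : ∀ c' ∈ cs, 0 ≤ c' := fun c' hc' => hcs c' (List.mem_cons_of_mem _ hc')
    rw [List.foldl_cons]
    by_cases h : PySem.List.pyGetD visC c true = false
    · have huc : PySem.List.pyGet? visC c = some false := (pvGetDFalseIff visC c).mp h
      have hstep : markStep (visC, comp, nxt) c =
          (PySem.List.pySetD visC c true, comp ++ [c], nxt ++ [c]) := by
        simp [markStep, h]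
      rw [hstep]
      obtain ⟨visC', d', heq, hnd, hmem, hV⟩ :=
        ih hcs' (PySem.List.pySetD visC c true) (comp ++ [c]) (nxt ++ [c])
      have hcd' : c ∉ d' := by
        intro hc
        have := ((hmem c).mp hc).1
        rw [pvGSself visC c h0c huc] at this; simp at this
      refine ⟨visC', c :: d', by rw [heq]; simp, hnd.cons hcd', ?_, ?_⟩
      · intro x
        constructor
        · intro hx
          rcases List.mem_cons.mp hx with rfl | hx
          · exact ⟨huc, List.mem_cons_self⟩
          · obtain ⟨hux, hxcs⟩ := (hmem x).mp hx
            have h0x : 0 ≤ x := hcs' x hxcs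
            have hxc : x ≠ c := by
              intro rfl
              rw [pvGSself visC x h0c huc] at hux; simp at hux
            rw [pvGSne visC c x h0c h0x hxc] at hux
            exact ⟨hux, List.mem_cons_of_mem _ hxcs⟩
        · rintro ⟨hux, hxcs⟩
          rcases List.mem_cons.mp hxcs with rfl | hxcs
          · exact List.mem_cons_self
          · have h0x : 0 ≤ x := hcs' x hxcs
            by_cases hxc : x = c
            · subst hxc; exact List.mem_cons_self
            · refine List.mem_cons_of_mem _ ((hmem x).mpr ⟨?_, hxcs⟩)
              rw [pvGSne visC c x h0c h0x hxc]; exact hux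
      · intro y h0y
        rw [hV y h0y]
        by_cases hyd : y ∈ d'
        · rw [if_pos hyd, if_pos (List.mem_cons_of_mem _ hyd)]
        · rw [if_neg hyd]
          by_cases hyc : y = c
          · subst hyc
            rw [if_pos List.mem_cons_self]
            exact pvGSself visC y h0c huc
          · rw [if_neg (by simp [hyc, hyd])]
            exact pvGSne visC c y h0c h0y hyc
    · have hstep : markStep (visC, comp, nxt) c = (visC, comp, nxt) := by
        simp [markStep, h]
      rw [hstep]
      obtain ⟨visC', d', heq, hnd, hmem, hV⟩ := ih hcs' visC comp nxt
      refine ⟨visC', d', heq, hnd, ?_, hV⟩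
      intro x
      rw [hmem x]
      constructor
      · rintro ⟨hux, hxcs⟩; exact ⟨hux, List.mem_cons_of_mem _ hxcs⟩
      · rintro ⟨hux, hxcs⟩
        rcases List.mem_cons.mp hxcs with rfl | hxcs
        · exact absurd ((pvGetDFalseIff visC x).mpr hux) h
        · exact ⟨hux, hxcs⟩

theorem pvLevelSpec (g : List (List Int)) (hg : ∀ row ∈ g, ∀ c ∈ row, 0 ≤ c)
    (front : List Int) (visC : List Bool) (comp nxt : List Int) :
    ∃ visC' d, levelStep g (visC, comp, nxt) front = (visC', comp ++ d, nxt ++ d) ∧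
      d.Nodup ∧
      (∀ x, x ∈ d ↔ (PySem.List.pyGet? visC x = some false ∧
        ∃ u ∈ front, ∃ row, PySem.List.pyGet? g u = some row ∧ x ∈ row)) ∧
      (∀ y : Int, 0 ≤ y → PySem.List.pyGet? visC' y =
        (if y ∈ d then some true else PySem.List.pyGet? visC y)) := by
  induction front generalizing visC comp nxt with
  | nil =>
    exact ⟨visC, [], by simp [levelStep], List.nodup_nil, by simp, by simp⟩
  | cons u front ih =>
    have hcs : ∀ c ∈ PySem.List.pyGetD g u [], 0 ≤ c := by
      rcases hgu : PySem.List.pyGet? g u with _ | row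
      · simp [PySem.List.pyGetD, hgu]
      · simpa [PySem.List.pyGetD, hgu] using
          hg row (PySem.List.mem_of_pyGet?_eq_some _ hgu)
    have hcsm : ∀ x : Int, (x ∈ PySem.List.pyGetD g u []) ↔
        ∃ row, PySem.List.pyGet? g u = some row ∧ x ∈ row := by
      rcases hgu : PySem.List.pyGet? g u with _ | row <;> simp [PySem.List.pyGetD, hgu]
    have hlev : levelStep g (visC, comp, nxt) (u :: front) =
        levelStep g ((PySem.List.pyGetD g u []).foldl markStep (visC, comp, nxt)) front := by
      simp [levelStep]
    obtain ⟨visC1, d1, heq1, hnd1, hmem1, hV1⟩ := pvRowFoldSpec _ hcs visC comp nxt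
    obtain ⟨visC', d2, heq2, hnd2, hmem2, hV2⟩ := ih visC1 (comp ++ d1) (nxt ++ d1)
    have hd2nn : ∀ x ∈ d2, 0 ≤ x := by
      intro x hx
      obtain ⟨_, u', _, row, hrow, hxr⟩ := (hmem2 x).mp hx
      exact hg row (PySem.List.mem_of_pyGet?_eq_some _ hrow) x hxr
    have hdisj : ∀ x ∈ d2, x ∉ d1 := by
      intro x hx hx1
      have hux1 := ((hmem2 x).mp hx).1
      rw [hV1 x (hd2nn x hx), if_pos hx1] at hux1; simp at hux1
    refine ⟨visC', d1 ++ d2, ?_, ?_, ?_, ?_⟩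
    · rw [hlev, heq1, heq2]; simp
    · exact hnd1.append hnd2 (List.disjoint_right.mpr hdisj)
    · intro x
      constructor
      · intro hx
        rcases List.mem_append.mp hx with hx | hx
        · obtain ⟨hux, hxcs⟩ := (hmem1 x).mp hx
          obtain ⟨row, hrow, hxr⟩ := (hcsm x).mp hxcs
          exact ⟨hux, u, List.mem_cons_self, row, hrow, hxr⟩
        · obtain ⟨hux, u', hm', row, hrow, hxr⟩ := (hmem2 x).mp hx
          have h0x : 0 ≤ x := hd2nn x hx
          rw [hV1 x h0x, if_neg (hdisj x hx)] at hux
          exact ⟨hux, u', List.mem_cons_of_mem _ hm', row, hrow, hxr⟩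
      · rintro ⟨hux, u', hm', row, hrow, hxr⟩
        have h0x : 0 ≤ x := hg row (PySem.List.mem_of_pyGet?_eq_some _ hrow) x hxr
        rcases List.mem_cons.mp hm' with rfl | hm'
        · exact List.mem_append_left _
            ((hmem1 x).mpr ⟨hux, (hcsm x).mpr ⟨row, hrow, hxr⟩⟩)
        · by_cases hx1 : x ∈ d1
          · exact List.mem_append_left _ hx1
          · refine List.mem_append_right _ ((hmem2 x).mpr ⟨?_, u', hm', row, hrow, hxr⟩)
            rw [hV1 x h0x, if_neg hx1]; exact hux
    · intro y h0y
      rw [hV2 y h0y]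
      by_cases hy2 : y ∈ d2
      · rw [if_pos hy2, if_pos (List.mem_append_right _ hy2)]
      · rw [if_neg hy2, hV1 y h0y]
        by_cases hy1 : y ∈ d1
        · rw [if_pos hy1, if_pos (List.mem_append_left _ hy1)]
        · rw [if_neg hy1, if_neg (by simp [hy1, hy2])]

-- ---- the two loop invariants ----
theorem pvLoopASpec (g : List (List Int)) (n : Nat)
    (hg : ∀ row ∈ g, ∀ c ∈ row, 0 ≤ c ∧ c < (n : Int) ∧ c < (g.length : Int))
    (vis : List Bool) (stack ans : List Int) (hlen : vis.length = n)
    (hs : ∀ p ∈ stack, 0 ≤ p ∧ p < (n : Int) ∧ p < (g.length : Int)) :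
    ∃ newly, dfsLoopA g vis stack ans = ans ++ newly ∧ newly.Nodup ∧
      (∀ x, x ∈ newly ↔ ReachA g vis stack x) := by
  induction vis, stack, ans using dfsLoopA.induct g with
  | case1 vis ans =>
    refine ⟨[], by simp [dfsLoopA], List.nodup_nil, fun x => ?_⟩
    simp only [List.not_mem_nil, false_iff]
    exact pvReachA_nil
  | case2 vis ans p rest hv =>
    obtain ⟨h0p, h1p, _⟩ := hs p List.mem_cons_self
    obtain ⟨a, ha⟩ := pvGetSome vis p h0p (by omega)
    rw [ha] at hv; cases hv
  | case3 vis ans p rest hv ih =>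
    obtain ⟨newly, heq, hnd, hmem⟩ :=
      ih hlen (fun q hq => hs q (List.mem_cons_of_mem _ hq))
    refine ⟨newly, ?_, hnd, fun x => ?_⟩
    · rw [dfsLoopA, hv]; exact heq
    · rw [hmem x]; exact (pvReachA_skip hv x).symm
  | case4 vis ans p rest hv hg' =>
    obtain ⟨h0p, _, h2p⟩ := hs p List.mem_cons_self
    obtain ⟨a, ha⟩ := pvGetSome g p h0p (by omega)
    rw [ha] at hg'; cases hg'
  | case5 vis ans p rest hv vis' row hrow ih =>
    obtain ⟨h0p, h1p, h2p⟩ := hs p List.mem_cons_self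
    have hrowg : row ∈ g := PySem.List.mem_of_pyGet?_eq_some _ hrow
    have hlen' : vis'.length = n := by
      show (PySem.List.pySetD vis p true).length = n
      rw [PySem.List.length_pySetD]; exact hlen
    have hs' : ∀ q ∈ (List.filter
          (fun c => decide (PySem.List.pyGetD vis' c true = false)) row).reverse ++ rest,
          0 ≤ q ∧ q < (n : Int) ∧ q < (g.length : Int) := by
      intro q hq
      rcases List.mem_append.mp hq with hq | hq
      · exact hg row hrowg q (List.mem_of_mem_filter (List.mem_reverse.mp hq))
      · exact hs q (List.mem_cons_of_mem _ hq)
    obtain ⟨newly, heq, hnd, hmem⟩ := ih hlen' hs'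
    have hvs : PySem.List.pyGet? vis' p = some true := pvGSself vis p h0p hv
    have hpn : p ∉ newly := by
      intro hp
      have := (pvReachA_unvis ((hmem p).mp hp)).2
      rw [hvs] at this; simp at this
    have hcond : ∀ y : Int, PySem.List.pyGet? vis' y = some false →
        ((y ∈ (List.filter
            (fun c => decide (PySem.List.pyGetD vis' c true = false)) row).reverse ++ rest)
          ↔ y ∈ row ++ rest) := by
      intro y hy
      have hgd := (pvGetDFalseIff vis' y).mpr hy
      simp only [List.mem_append, List.mem_reverse, List.mem_filter, decide_eq_true_eq]
      tauto
    refine ⟨p :: newly, ?_, List.nodup_cons.mpr ⟨hpn, hnd⟩, fun x => ?_⟩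
    · rw [dfsLoopA, hv, hrow]; dsimp only; rw [heq]; simp
    · rw [pvReachA_frontier h0p hv hrow x]
      constructor
      · intro hx
        rcases List.mem_cons.mp hx with rfl | hx
        · exact Or.inl rfl
        · exact Or.inr (pvReachA_congr
            (fun y _ hy hm => (hcond y hy).mp hm) ((hmem x).mp hx))
      · rintro (rfl | hr)
        · exact List.mem_cons_self
        · exact List.mem_cons_of_mem _ ((hmem x).mpr
            (pvReachA_congr (fun y _ hy hm => (hcond y hy).mpr hm) hr))

theorem pvLoopBSpec (g : List (List Int)) (hg : ∀ row ∈ g, ∀ c ∈ row, 0 ≤ c)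
    (vis : List Bool) (front comp : List Int) :
    ∃ newly, dfsLoopB g vis front comp = comp ++ newly ∧ newly.Nodup ∧
      (∀ x, x ∈ newly ↔ ReachB g vis front x) := by
  induction vis, front, comp using dfsLoopB.induct g with
  | case1 vis comp =>
    refine ⟨[], by simp [dfsLoopB], List.nodup_nil, fun x => ?_⟩
    simp only [List.not_mem_nil, false_iff]
    exact pvReachB_nil
  | case2 vis comp p rest st ih =>
    obtain ⟨vis1, d, heq, hnd, hmem, hV⟩ := pvLevelSpec g hg (p :: rest) vis comp []
    have hdnn : ∀ x ∈ d, 0 ≤ x := by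
      intro x hx
      obtain ⟨_, u', _, row, hrow, hxr⟩ := (hmem x).mp hx
      exact hg row (PySem.List.mem_of_pyGet?_eq_some _ hrow) x hxr
    have hst : st = (vis1, comp ++ d, [] ++ d) := heq
    obtain ⟨newly, heq2, hnd2, hmem2⟩ := ih
    rw [hst] at heq2 hmem2
    have hdisj : ∀ x ∈ newly, x ∉ d := by
      intro x hx hxd
      have hux := (pvReachB_unvis ((hmem2 x).mp hx)).2
      rw [hV x (hdnn x hxd), if_pos hxd] at hux; simp at hux
    refine ⟨d ++ newly, ?_, ?_, fun x => ?_⟩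
    · rw [dfsLoopB]
      rw [heq]
      dsimp only at heq2 ⊢
      rw [heq2]
      simp
    · exact hnd.append hnd2 (List.disjoint_right.mpr hdisj)
    · rw [List.mem_append, hmem2 x,
        pvReachB_level hmem hdnn hV x]
      simp

-- ===== VERDICT (by name: the statement is the Claim_ definition above) =====
theorem dfs_spec : Claim_equal_dfs := by
  intro node visited graph _ hpre
  show dfs node visited graph = dfs_alt node visited graph
  rcases hpre with hb | ⟨h0, h1, h2, hpg⟩
  · -- start node already visited: both sides return []
    have hA : dfsLoopA graph visited [node] [] = ([] : List Int) := by
      rw [dfsLoopA, hb, dfsLoopA]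
    simp only [dfs, dfs_alt, hb, hA]
    decide
  obtain ⟨b, hb⟩ := pvGetSome visited node h0 h1
  obtain ⟨row, hrow⟩ := pvGetSome graph node h0 h2
  cases b
  · -- node initially unvisited
    obtain ⟨nA, heqA, hndA, hmemA⟩ :=
      pvLoopASpec graph visited.length
        (fun r hr c hc => hpg r hr c hc) visited [node] [] rfl
        (by rintro p hp; rcases List.mem_cons.mp hp with rfl | hp
            · exact ⟨h0, h1, h2⟩
            · simp at hp)
    obtain ⟨nB, heqB, hndB, hmemB⟩ :=
      pvLoopBSpec graph (fun r hr c hc => (hpg r hr c hc).1)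
        (PySem.List.pySetD visited node true) [node] [node]
    have hvs : PySem.List.pyGet? (PySem.List.pySetD visited node true) node = some true :=
      pvGSself visited node h0 hb
    have hnn : node ∉ nB := by
      intro hn
      have := (pvReachB_unvis ((hmemB node).mp hn)).2
      rw [hvs] at this; simp at this
    have hmem : ∀ x, x ∈ nA ↔ x ∈ node :: nB := by
      intro x
      rw [hmemA x, List.mem_cons, hmemB x, pvReachBA hrow x]
      have := pvReachA_frontier (rest := []) h0 hb hrow x
      rw [List.append_nil] at this
      exact this
    have hperm : nA.Perm (node :: nB) :=
      (List.perm_ext_iff_of_nodup hndA (List.nodup_cons.mpr ⟨hnn, hndB⟩)).mpr hmem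
    simp only [dfs, dfs_alt, hb, heqA, heqB, List.nil_append]
    exact PySem.List.sorted_eq_sorted_of_perm _ _ _ (fun a b h => h) hperm
  · -- node already visited: both return []
    have hA : dfsLoopA graph visited [node] [] = ([] : List Int) := by
      rw [dfsLoopA, hb, dfsLoopA]
    simp only [dfs, dfs_alt, hb, hA]
    decide
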